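-- pv_equiv track=rewrite | github.com/Angela-OH/Algorithm | 프로그래머스/Lv.3/64064.py | solution
-- ===== SOURCE A (Python) =====
-- def solution(user_id, banned_id):
--     answer = 0
--     dic = {b: [] for b in banned_id}
--     for index, user in enumerate(user_id):
--         for banned in banned_id:
--             cnt = 0
--             if len(user) != len(banned):
--                 continue
--             for i in range(len(user)):
--                 if banned[i] == '*':
--                     continue
--                 if banned[i] != user[i]:
--                     cnt = 1
--                     break
--             if cnt == 0:
--                 if index not in dic[banned]:
--                     dic[banned].append(index)
--     ans_list = []
--     stack = []
--     for i, v in enumerate(dic[banned_id[0]]):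
--         stack.append((v, 0))
--
--     ans = [-1 for _ in range(len(banned_id))]
--     while stack:
--         result, index = stack.pop()
--         if result in ans[:index]:
--             continue
--         ans[index] = result
--         if index == len(banned_id) - 1:
--             ans_list.append(ans[:])
--             continue
--         for d in dic[banned_id[index + 1]]:
--             if result == d and d in ans:
--                 continue
--
--             stack.append((d, index + 1))
--
--     for l in list(set([tuple(set(ans)) for ans in ans_list])):
--         if len(l) < len(banned_id):
--             continue
--         answer += 1
--
--     return answer
-- ===== SOURCE B (Python) =====
-- def solution(user_id, banned_id):
--     k = len(banned_id)
--     cands = [[i for i, u in enumerate(user_id)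
--               if len(u) == len(b) and all(bc == '*' or bc == uc for uc, bc in zip(u, b))]
--              for b in banned_id]
--     res = set()
--
--     def go(pos, combo):
--         if pos == k:
--             s = set(combo)
--             if len(s) == k:
--                 res.add(tuple(s))
--             return
--         for c in cands[pos]:
--             go(pos + 1, combo + [c])
--
--     go(0, [])
--     return len(res)
-- ===== Notes on version B (the rewrite author's own statement) =====
-- stated objective: simpler
-- what changed: Replaces A's explicit-stack DFS over a shared mutable slot array (-1 sentinels, ans[:index] prefix checks, push-time pruning, and a final list(set([tuple(set(ans))...])) pass) by per-mask candidate lists and a plain product recursion that keeps tuple(set(combo)) exactly when the combo has k distinct users; both sides dedup via the same tuple(set(...)) builtin, so B matches A everywhere A returns, including the CPython set-order dedup on indices >= 8.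
import Mathlib
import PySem

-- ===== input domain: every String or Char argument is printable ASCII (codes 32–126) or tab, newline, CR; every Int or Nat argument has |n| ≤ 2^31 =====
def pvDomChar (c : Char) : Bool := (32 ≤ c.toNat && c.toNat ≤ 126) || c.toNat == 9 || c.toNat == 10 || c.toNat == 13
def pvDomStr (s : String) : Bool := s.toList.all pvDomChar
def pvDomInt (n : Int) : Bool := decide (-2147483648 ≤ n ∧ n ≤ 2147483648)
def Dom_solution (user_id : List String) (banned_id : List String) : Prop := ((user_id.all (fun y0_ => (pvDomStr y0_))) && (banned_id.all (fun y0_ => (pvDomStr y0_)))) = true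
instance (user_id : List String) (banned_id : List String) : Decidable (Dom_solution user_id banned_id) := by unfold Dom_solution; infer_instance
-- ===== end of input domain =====

-- B replaces A's explicit-stack DFS over a shared mutable slot array by candidate lists per
-- mask and a plain product recursion collecting tuple(set(combo)) (simpler, not faster:
-- it trades A's on-path pruning for an unpruned product scan).

-- ===== shared model of the builtin tuple(set(xs)) both Pythons apply to lists of user indices =====
-- CPython set of small nonnegative ints (hash(i) = i for the 0 ≤ i < 2^61 that occur here):
-- open-addressing table of 8 slots, probe = 9 linear slots then (i*5+1+perturb) mod size with
-- perturb >>= 5, resize to the next power of two above used*4 (used*2 past 50000) when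
-- fill*5 ≥ mask*3; iteration ascends slots. Both Source A and Source B call tuple(set(...)) on such
-- ints, so both ports share this model of the builtin. The fuel/range guards below only
-- totalize the probe loop; they are unreachable for the power-of-two tables that occur.

def pvLinScan (t : List (Option Int)) : Nat → Nat → Option Nat
  | _, 0 => none
  | i, j + 1 => if t.getD i (some 0) = none then some i else pvLinScan t (i + 1) j

def pvFindNone (t : List (Option Int)) (mask : Nat) : Nat → Nat → Nat → Option Nat
  | 0, _, _ => none
  | fuel + 1, i, perturb =>
    if t.getD i (some 0) = none then some i
    else
      match (if i + 9 ≤ mask then pvLinScan t (i + 1) 9 else none) with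
      | some j => some j
      | none => pvFindNone t mask fuel ((i * 5 + 1 + (perturb >>> 5)) % (mask + 1)) (perturb >>> 5)

def pvSetFirstNone : List (Option Int) → Int → List (Option Int)
  | [], k => [some k]
  | none :: rest, k => some k :: rest
  | some v :: rest, k => some v :: pvSetFirstNone rest k

-- add key k to the table (no resize); true iff newly inserted
def pvPlaceKey (t : List (Option Int)) (k : Int) : List (Option Int) × Bool :=
  if some k ∈ t then (t, false)
  else
    match pvFindNone t (t.length - 1) (t.length + 32) (k.toNat % t.length) k.toNat with
    | some i =>
      if _h : i < t.length ∧ t.getD i (some 0) = none then (t.set i (some k), true)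
      else (pvSetFirstNone t k, true)
    | none => (pvSetFirstNone t k, true)

def pvInsertAll (es : List Int) (t : List (Option Int)) : List (Option Int) :=
  es.foldl (fun t e => (pvPlaceKey t e).1) t

def pvGrowSize : Nat → Nat → Nat → Nat
  | 0, ns, _ => ns
  | f + 1, ns, minused => if ns ≤ minused then pvGrowSize f (ns * 2) minused else ns

def pvSetAdd (st : List (Option Int) × Nat) (k : Int) : List (Option Int) × Nat :=
  match pvPlaceKey st.1 k with
  | (t', added) =>
    if added then
      let used := st.2 + 1
      if used * 5 ≥ (t'.length - 1) * 3 then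
        let minused := if used > 50000 then used * 2 else used * 4
        (pvInsertAll (t'.filterMap id) (List.replicate (pvGrowSize (minused + 8) 8 minused) none), used)
      else (t', used)
    else (t', st.2)

def pySetTuple (xs : List Int) : List Int :=
  ((xs.foldl pvSetAdd (List.replicate 8 none, 0)).1).filterMap id

-- ===== PORT A =====

-- A's inner `for i in range(len(user))` mismatch loop: `break` with cnt = 1 at the first
-- non-'*' mismatch is an early return of 1; called only on equal-length strings.
def solCnt : List Char → List Char → Nat
  | b :: bs, u :: us =>
    if b = '*' then solCnt bs us
    else if b ≠ u then 1
    else solCnt bs us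
  | _, _ => 0

-- dic = {b: [] for b in banned_id} followed by A's double loop appending matching indices.
-- Python's dic[banned] never raises here (every key was inserted), so getD/modify with
-- default [] is exact.
def solDic (user_id : List String) (banned_id : List String) : PySem.Dict String (List Int) :=
  (PySem.List.enumerate user_id).foldl
    (fun d iu =>
      banned_id.foldl
        (fun d b =>
          if PySem.Str.len iu.2 ≠ PySem.Str.len b then d
          else if solCnt b.toList iu.2.toList = 0 then
            (if iu.1 ∈ d.getD b [] then d
             else d.modify b [] (fun l => l ++ [iu.1]))
          else d)
        d)
    (banned_id.foldl (fun d b => d.insert b ([] : List Int)) PySem.Dict.empty)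

-- dic[banned_id[j]] (the list A indexes with banned_id[0] / banned_id[index+1]); the getD ""
-- default only totalizes the out-of-range case Python never reaches inside Pre_.
def solCandf (dic : PySem.Dict String (List Int)) (banned_id : List String) (j : Nat) : List Int :=
  dic.getD ((PySem.List.pyGet? banned_id (j : Int)).getD "") []

-- A's `while stack` loop. The Python list-stack (append/pop at the right end) is represented
-- head-first: Python append = cons, pop = head. `fuel` totalizes the while loop;
-- solution passes (len(user_id)+1)^k, proven sufficient in solLoop_spec below.
def solLoop (k : Nat) (dic : PySem.Dict String (List Int)) (banned_id : List String) :
    Nat → List (Int × Nat) → List Int → List (List Int) → List (List Int)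
  | 0, _, _, acc => acc
  | _ + 1, [], _, acc => acc
  | fuel + 1, (v, i) :: stack, ans, acc =>
    if v ∈ ans.take i then
      solLoop k dic banned_id fuel stack ans acc
    else
      let ans' := ans.set i v
      if i = k - 1 then
        solLoop k dic banned_id fuel stack ans' (acc ++ [ans'])
      else
        solLoop k dic banned_id fuel
          ((solCandf dic banned_id (i + 1)).foldl
            (fun st d => if d = v ∧ d ∈ ans' then st else (d, i + 1) :: st) stack)
          ans' acc

def solution (user_id : List String) (banned_id : List String) : Int :=
  let dic := solDic user_id banned_id
  let k := banned_id.length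
  let stack0 := (solCandf dic banned_id 0).foldl (fun st v => (v, (0 : Nat)) :: st) []
  let ansList := solLoop k dic banned_id ((user_id.length + 1) ^ k) stack0 (List.replicate k (-1)) []
  -- [tuple(set(ans)) for ans in ans_list], via the exact model of the builtin above
  let tuples := ansList.map pySetTuple
  -- `for l in list(set(tuples)): if len(l) < k: continue; answer += 1` — a count, order-free.
  (PySem.Set.ofList tuples).foldl (fun answer l => if l.length < k then answer else answer + 1) (0 : Int)

-- ===== PORT B =====

def solMatch (u b : String) : Bool :=
  PySem.Str.len u == PySem.Str.len b
    && (u.toList.zip b.toList).all (fun p => p.2 == '*' || p.2 == p.1)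

def solCands (user_id : List String) (banned_id : List String) : List (List Int) :=
  banned_id.map (fun b =>
    (PySem.List.enumerate user_id).filterMap (fun iu => if solMatch iu.2 b then some iu.1 else none))

-- Source B's go: bare product recursion over cands; at a full combo keep tuple(set(combo)) iff
-- the set has k elements. The `for c in cands[pos]` loop is altGo (hpos only for termination).
mutual
def altRec (k : Nat) (cands : List (List Int)) (pos : Nat) (combo : List Int)
    (res : PySem.Set (List Int)) : PySem.Set (List Int) :=
  if h : k ≤ pos then
    (if (pySetTuple combo).length = k then PySem.Set.add res (pySetTuple combo) else res)
  else altGo k cands (cands.getD pos []) pos (by omega) combo res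
termination_by (k - pos, 1, 0)

def altGo (k : Nat) (cands : List (List Int)) (cs : List Int) (pos : Nat) (hpos : pos < k)
    (combo : List Int) (res : PySem.Set (List Int)) : PySem.Set (List Int) :=
  match cs with
  | [] => res
  | c :: cs => altGo k cands cs pos hpos combo (altRec k cands (pos + 1) (combo ++ [c]) res)
termination_by (k - pos, 0, cs.length)
end

def solution_alt (user_id : List String) (banned_id : List String) : Int :=
  let k := banned_id.length
  let cands := solCands user_id banned_id
  ((altRec k cands 0 [] PySem.Set.empty).length : Int)

-- ===== PRECONDITION & SPEC =====

-- Pre_ excludes only empty banned_id, on which A raises IndexError at banned_id[0].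
def Pre_solution (user_id : List String) (banned_id : List String) : Prop :=
  banned_id ≠ []

instance (user_id : List String) (banned_id : List String) : Decidable (Pre_solution user_id banned_id) := by
  unfold Pre_solution; infer_instance

def pvWitness_solution : List String × List String := (["frodo", "abc123"], ["fr*d*", "abc1**"])

def Spec_solution (user_id : List String) (banned_id : List String) (out : Int) : Prop :=
  out = solution_alt user_id banned_id

instance (user_id : List String) (banned_id : List String) (out : Int) : Decidable (Spec_solution user_id banned_id out) := by
  unfold Spec_solution; infer_instance

-- ===== CLAIM (what is proved, stated in full; the proofs are below) =====
def Claim_equal_solution : Prop := ∀ (user_id : List String) (banned_id : List String), Dom_solution user_id banned_id → Pre_solution user_id banned_id → Spec_solution user_id banned_id (solution user_id banned_id)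

-- ===== LEMMAS AND PROOFS =====

-- ---- facts about the tuple(set(·)) model ----

theorem pvGetD_none_getElem (t : List (Option Int)) (i : Nat)
    (h : t.getD i (some 0) = none) : t[i]? = some none := by
  rw [List.getD_eq_getElem?_getD] at h
  cases he : t[i]? with
  | none => rw [he] at h; simp at h
  | some x => rw [he] at h; simp at h; rw [h]

theorem count_set_none : ∀ (t : List (Option Int)) (i : Nat) (k v : Int),
    t[i]? = some none →
    (t.set i (some k)).count (some v) = t.count (some v) + (if v = k then 1 else 0) := by
  intro t
  induction t with
  | nil => intro i k v h; simp at h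
  | cons a rest ih =>
    intro i k v h
    cases i with
    | zero =>
      simp only [List.getElem?_cons_zero, Option.some_inj] at h
      subst h
      simp only [List.set_cons_zero, List.count_cons, beq_iff_eq]
      by_cases hv : v = k
      · simp [hv]
      · have hv' : ¬ k = v := fun h => hv h.symm
        simp [hv, hv']
    | succ n =>
      simp only [List.getElem?_cons_succ] at h
      simp only [List.set_cons_succ, List.count_cons, ih n k v h]
      omega

theorem count_setFirstNone : ∀ (t : List (Option Int)) (k v : Int),
    (pvSetFirstNone t k).count (some v) = t.count (some v) + (if v = k then 1 else 0) := by
  intro t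
  induction t with
  | nil =>
    intro k v
    simp only [pvSetFirstNone, List.count_cons, List.count_nil, beq_iff_eq]
    by_cases hv : v = k
    · simp [hv]
    · have hv' : ¬ k = v := fun h => hv h.symm
      simp [hv, hv']
  | cons a rest ih =>
    intro k v
    cases a with
    | none =>
      simp only [pvSetFirstNone, List.count_cons, beq_iff_eq]
      by_cases hv : v = k
      · simp [hv]
      · have hv' : ¬ k = v := fun h => hv h.symm
        simp [hv, hv']
    | some w =>
      simp only [pvSetFirstNone, List.count_cons, ih k v]
      omega

theorem pvPlaceKey_count (t : List (Option Int)) (k v : Int) :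
    ((pvPlaceKey t k).1).count (some v)
      = t.count (some v) + (if v = k ∧ some k ∉ t then 1 else 0) := by
  unfold pvPlaceKey
  by_cases hm : some k ∈ t
  · simp [hm]
  · rw [if_neg hm]
    cases hf : pvFindNone t (t.length - 1) (t.length + 32) (k.toNat % t.length) k.toNat with
    | none => simp [count_setFirstNone, hm]
    | some i =>
      simp only
      by_cases hi : i < t.length ∧ t.getD i (some 0) = none
      · rw [dif_pos hi]
        simp only
        rw [count_set_none t i k v (pvGetD_none_getElem t i hi.2)]
        simp [hm]
      · rw [dif_neg hi]
        simp [count_setFirstNone, hm]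

theorem pvPlaceKey_mem (t : List (Option Int)) (k v : Int) :
    some v ∈ (pvPlaceKey t k).1 ↔ v = k ∨ some v ∈ t := by
  have hcnt := pvPlaceKey_count t k v
  constructor
  · intro hmem
    have hpos : 0 < ((pvPlaceKey t k).1).count (some v) := List.count_pos_iff.mpr hmem
    rw [hcnt] at hpos
    by_cases hv : v = k
    · exact Or.inl hv
    · right
      rw [if_neg (by tauto)] at hpos
      exact List.count_pos_iff.mp (by omega)
  · intro hor
    refine List.count_pos_iff.mp ?_
    rw [hcnt]
    rcases hor with hv | hmem
    · subst hv
      by_cases hm : some v ∈ t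
      · have := List.count_pos_iff.mpr hm; omega
      · rw [if_pos ⟨rfl, hm⟩]; omega
    · have := List.count_pos_iff.mpr hmem; omega

theorem pvPlaceKey_inv (t : List (Option Int)) (k : Int)
    (h : ∀ w, t.count (some w) ≤ 1) :
    ∀ w, ((pvPlaceKey t k).1).count (some w) ≤ 1 := by
  intro w
  rw [pvPlaceKey_count]
  by_cases hc : w = k ∧ some k ∉ t
  · rw [if_pos hc]
    have : t.count (some w) = 0 := by
      rw [List.count_eq_zero]
      rw [hc.1]; exact hc.2
    omega
  · rw [if_neg hc]
    have := h w
    omega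

theorem pvInsertAll_mem : ∀ (es : List Int) (t : List (Option Int)) (v : Int),
    some v ∈ pvInsertAll es t ↔ v ∈ es ∨ some v ∈ t := by
  intro es
  induction es with
  | nil => intro t v; simp [pvInsertAll]
  | cons e es ih =>
    intro t v
    show some v ∈ pvInsertAll es (pvPlaceKey t e).1 ↔ _
    rw [ih, pvPlaceKey_mem]
    simp [List.mem_cons]
    tauto

theorem pvInsertAll_inv : ∀ (es : List Int) (t : List (Option Int)),
    (∀ w, t.count (some w) ≤ 1) → ∀ w, (pvInsertAll es t).count (some w) ≤ 1 := by
  intro es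
  induction es with
  | nil => intro t h w; exact h w
  | cons e es ih =>
    intro t h w
    exact ih _ (pvPlaceKey_inv t e h) w

theorem mem_filterMap_id (t : List (Option Int)) (v : Int) :
    v ∈ t.filterMap id ↔ some v ∈ t := by
  simp [List.mem_filterMap]

theorem count_replicate_none (n : Nat) (v : Int) :
    (List.replicate n (none : Option Int)).count (some v) = 0 := by
  rw [List.count_eq_zero]
  intro h
  have := List.eq_of_mem_replicate h
  simp at this

theorem pvSetAdd_mem (st : List (Option Int) × Nat) (k v : Int) :
    some v ∈ (pvSetAdd st k).1 ↔ v = k ∨ some v ∈ st.1 := by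
  unfold pvSetAdd
  cases hp : pvPlaceKey st.1 k with
  | mk t' added =>
    have ht' : t' = (pvPlaceKey st.1 k).1 := by rw [hp]
    cases added with
    | false => simp [ht', pvPlaceKey_mem]
    | true =>
      simp only
      rw [if_pos trivial]
      by_cases hres : (st.2 + 1) * 5 ≥ (t'.length - 1) * 3
      · rw [if_pos hres]
        rw [pvInsertAll_mem]
        constructor
        · rintro (h | h)
          · rw [mem_filterMap_id] at h
            rw [ht', pvPlaceKey_mem] at h
            exact h
          · exfalso
            have := List.eq_of_mem_replicate h
            simp at this
        · intro h
          left
          rw [mem_filterMap_id, ht', pvPlaceKey_mem]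
          exact h
      · rw [if_neg hres]
        show some v ∈ t' ↔ _
        rw [ht', pvPlaceKey_mem]

theorem pvSetAdd_inv (st : List (Option Int) × Nat) (k : Int)
    (h : ∀ w, st.1.count (some w) ≤ 1) :
    ∀ w, ((pvSetAdd st k).1).count (some w) ≤ 1 := by
  intro w
  unfold pvSetAdd
  cases hp : pvPlaceKey st.1 k with
  | mk t' added =>
    have ht' : t' = (pvPlaceKey st.1 k).1 := by rw [hp]
    cases added with
    | false => simpa [ht'] using pvPlaceKey_inv st.1 k h w
    | true =>
      simp only
      rw [if_pos trivial]
      by_cases hres : (st.2 + 1) * 5 ≥ (t'.length - 1) * 3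
      · rw [if_pos hres]
        refine pvInsertAll_inv _ _ (fun u => ?_) w
        rw [count_replicate_none]
        omega
      · rw [if_neg hres]
        simpa [ht'] using pvPlaceKey_inv st.1 k h w

theorem foldl_setAdd_props : ∀ (xs : List Int) (st : List (Option Int) × Nat),
    (∀ w, st.1.count (some w) ≤ 1) →
    (∀ w, ((xs.foldl pvSetAdd st).1).count (some w) ≤ 1)
      ∧ (∀ v, some v ∈ (xs.foldl pvSetAdd st).1 ↔ v ∈ xs ∨ some v ∈ st.1) := by
  intro xs
  induction xs with
  | nil => intro st h; exact ⟨h, fun v => by simp⟩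
  | cons x xs ih =>
    intro st h
    have h' := pvSetAdd_inv st x h
    obtain ⟨h1, h2⟩ := ih (pvSetAdd st x) h'
    refine ⟨h1, fun v => ?_⟩
    rw [List.foldl_cons, h2 v, pvSetAdd_mem]
    simp [List.mem_cons]
    tauto

theorem count_filterMap_id : ∀ (t : List (Option Int)) (v : Int),
    (t.filterMap id).count v = t.count (some v) := by
  intro t
  induction t with
  | nil => intro v; simp
  | cons a rest ih =>
    intro v
    cases a with
    | none =>
      have he : (none :: rest : List (Option Int)).filterMap id = rest.filterMap id := by
        simp
      rw [he, ih, List.count_cons]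
      simp
    | some w =>
      have he : (some w :: rest : List (Option Int)).filterMap id = w :: rest.filterMap id := by
        simp
      rw [he, List.count_cons, List.count_cons, ih]
      simp [beq_iff_eq]

theorem pySetTuple_mem (xs : List Int) (v : Int) : v ∈ pySetTuple xs ↔ v ∈ xs := by
  unfold pySetTuple
  rw [mem_filterMap_id]
  obtain ⟨-, h2⟩ := foldl_setAdd_props xs (List.replicate 8 none, 0)
    (fun w => by rw [count_replicate_none]; omega)
  rw [h2 v]
  constructor
  · rintro (h | h)
    · exact h
    · exfalso
      have := List.eq_of_mem_replicate h
      simp at this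
  · exact Or.inl

theorem pySetTuple_nodup (xs : List Int) : (pySetTuple xs).Nodup := by
  unfold pySetTuple
  rw [List.nodup_iff_count_le_one]
  intro v
  rw [count_filterMap_id]
  obtain ⟨h1, -⟩ := foldl_setAdd_props xs (List.replicate 8 none, 0)
    (fun w => by rw [count_replicate_none]; omega)
  exact h1 v

theorem pySetTuple_perm_dedup (xs : List Int) : (pySetTuple xs).Perm xs.dedup := by
  rw [List.perm_ext_iff_of_nodup (pySetTuple_nodup xs) (List.nodup_dedup xs)]
  intro a
  rw [pySetTuple_mem, List.mem_dedup]

theorem pySetTuple_length_eq_iff (c : List Int) (k : Nat) (hl : c.length = k) :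
    (pySetTuple c).length = k ↔ c.Nodup := by
  rw [(pySetTuple_perm_dedup c).length_eq]
  constructor
  · intro h
    have heq : c.dedup = c := (List.dedup_sublist c).eq_of_length (by omega)
    exact (List.dedup_eq_self).mp heq
  · intro h
    rw [List.dedup_eq_self.mpr h, hl]

theorem pySetTuple_length_of_nodup (c : List Int) (h : c.Nodup) :
    (pySetTuple c).length = c.length :=
  (pySetTuple_length_eq_iff c c.length rfl).mpr h

-- ---- enumeration specs ----

-- the candidate extensions of `chosen` from level pos, distinct-pruned, scanning candidates
-- right-to-left (A's pop order) resp. left-to-right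
def specR (candf : Nat → List Int) : Nat → Nat → List Int → List (List Int)
  | 0, _, chosen => [chosen]
  | rem + 1, pos, chosen =>
    (candf pos).reverse.flatMap (fun c => if c ∈ chosen then [] else specR candf rem (pos + 1) (chosen ++ [c]))

def specL (candf : Nat → List Int) : Nat → Nat → List Int → List (List Int)
  | 0, _, chosen => [chosen]
  | rem + 1, pos, chosen =>
    (candf pos).flatMap (fun c => if c ∈ chosen then [] else specL candf rem (pos + 1) (chosen ++ [c]))

-- the unpruned product (B's enumeration)
def specP (candf : Nat → List Int) : Nat → Nat → List Int → List (List Int)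
  | 0, _, chosen => [chosen]
  | rem + 1, pos, chosen =>
    (candf pos).flatMap (fun c => specP candf rem (pos + 1) (chosen ++ [c]))

theorem specR_mem (candf : Nat → List Int) :
    ∀ (rem pos : Nat) (chosen : List Int) (x : List Int),
      x ∈ specR candf rem pos chosen ↔ x ∈ specL candf rem pos chosen := by
  intro rem
  induction rem with
  | zero => intro pos chosen x; simp [specR, specL]
  | succ rem ih =>
    intro pos chosen x
    simp only [specR, specL, List.mem_flatMap, List.mem_reverse]
    constructor
    · rintro ⟨c, hc, hx⟩
      refine ⟨c, hc, ?_⟩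
      by_cases h : c ∈ chosen
      · simp [h] at hx
      · simp only [if_neg h] at hx ⊢; exact (ih _ _ _).1 hx
    · rintro ⟨c, hc, hx⟩
      refine ⟨c, hc, ?_⟩
      by_cases h : c ∈ chosen
      · simp [h] at hx
      · simp only [if_neg h] at hx ⊢; exact (ih _ _ _).2 hx

theorem specP_prefix (candf : Nat → List Int) :
    ∀ (rem pos : Nat) (chosen : List Int) (x : List Int),
      x ∈ specP candf rem pos chosen → chosen <+: x := by
  intro rem
  induction rem with
  | zero => intro pos chosen x hx; simp only [specP, List.mem_singleton] at hx; subst hx; exact List.prefix_refl _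
  | succ rem ih =>
    intro pos chosen x hx
    simp only [specP, List.mem_flatMap] at hx
    obtain ⟨c, -, hx⟩ := hx
    exact List.IsPrefix.trans (List.prefix_append chosen [c]) (ih _ _ _ hx)

theorem specP_length (candf : Nat → List Int) :
    ∀ (rem pos : Nat) (chosen : List Int) (x : List Int),
      x ∈ specP candf rem pos chosen → x.length = chosen.length + rem := by
  intro rem
  induction rem with
  | zero => intro pos chosen x hx; simp only [specP, List.mem_singleton] at hx; subst hx; rfl
  | succ rem ih =>
    intro pos chosen x hx
    simp only [specP, List.mem_flatMap] at hx
    obtain ⟨c, -, hx⟩ := hx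
    have := ih _ _ _ hx
    simp only [List.length_append, List.length_singleton] at this
    omega

theorem specL_mem_iff (candf : Nat → List Int) :
    ∀ (rem pos : Nat) (chosen : List Int), chosen.Nodup →
      ∀ x, x ∈ specL candf rem pos chosen ↔ x ∈ specP candf rem pos chosen ∧ x.Nodup := by
  intro rem
  induction rem with
  | zero =>
    intro pos chosen hnd x
    simp only [specL, specP, List.mem_singleton]
    constructor
    · intro h; subst h; exact ⟨rfl, hnd⟩
    · exact fun h => h.1
  | succ rem ih =>
    intro pos chosen hnd x
    simp only [specL, specP, List.mem_flatMap]
    constructor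
    · rintro ⟨c, hc, hx⟩
      by_cases h : c ∈ chosen
      · simp [h] at hx
      · simp only [if_neg h] at hx
        have hnd' : (chosen ++ [c]).Nodup := by
          refine List.Nodup.append hnd (List.nodup_singleton _) ?_
          intro a ha hac
          rw [List.mem_singleton] at hac
          exact h (hac ▸ ha)
        obtain ⟨h1, h2⟩ := (ih _ _ hnd' x).1 hx
        exact ⟨⟨c, hc, h1⟩, h2⟩
    · rintro ⟨⟨c, hc, hx⟩, hndx⟩
      refine ⟨c, hc, ?_⟩
      have hpre : (chosen ++ [c]) <+: x := specP_prefix candf rem (pos + 1) (chosen ++ [c]) x hx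
      have hnd' : (chosen ++ [c]).Nodup := hndx.sublist hpre.sublist
      have h : c ∉ chosen := by
        have hperm : (chosen ++ [c]).Perm (c :: chosen) := List.perm_append_singleton c chosen
        exact (List.nodup_cons.mp (hperm.nodup_iff.mp hnd')).1
      rw [if_neg h]
      exact (ih _ _ hnd' x).2 ⟨hx, hndx⟩

theorem specR_congr (candf1 candf2 : Nat → List Int) :
    ∀ (rem pos : Nat) (chosen : List Int),
      (∀ j, pos ≤ j → j < pos + rem → candf1 j = candf2 j) →
      specR candf1 rem pos chosen = specR candf2 rem pos chosen := by
  intro rem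
  induction rem with
  | zero => intro pos chosen _; simp [specR]
  | succ rem ih =>
    intro pos chosen h
    simp only [specR]
    rw [h pos le_rfl (by omega)]
    congr 1
    funext c
    split
    · rfl
    · exact ih (pos + 1) (chosen ++ [c]) (fun j h1 h2 => h j (by omega) (by omega))

-- B's recursion computes the fold of the product enumeration specP
theorem altRec_eq (k : Nat) (cands : List (List Int)) :
    ∀ (rem pos : Nat) (combo : List Int) (res : PySem.Set (List Int)),
      k - pos ≤ rem →
      altRec k cands pos combo res
        = (specP (fun j => cands.getD j []) (k - pos) pos combo).foldl
            (fun r p => if (pySetTuple p).length = k then PySem.Set.add r (pySetTuple p) else r) res := by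
  intro rem
  induction rem with
  | zero =>
    intro pos combo res h
    have hk : k ≤ pos := by omega
    rw [altRec, dif_pos hk]
    have h0 : k - pos = 0 := by omega
    simp [h0, specP]
  | succ rem ih =>
    intro pos combo res h
    by_cases hk : k ≤ pos
    · rw [altRec, dif_pos hk]
      have h0 : k - pos = 0 := by omega
      simp [h0, specP]
    · rw [altRec, dif_neg hk]
      have hpos : pos < k := by omega
      obtain ⟨m, hm⟩ : ∃ m, k - pos = m + 1 := ⟨k - (pos + 1), by omega⟩
      have hm' : k - (pos + 1) = m := by omega
      have aux : ∀ (cs : List Int) (r : PySem.Set (List Int)),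
          altGo k cands cs pos hpos combo r
            = (cs.flatMap (fun c => specP (fun j => cands.getD j []) m (pos + 1) (combo ++ [c]))).foldl
                (fun r p => if (pySetTuple p).length = k then PySem.Set.add r (pySetTuple p) else r) r := by
        intro cs
        induction cs with
        | nil => intro r; simp [altGo]
        | cons c cs ihcs =>
          intro r
          rw [altGo, ihcs, List.flatMap_cons, List.foldl_append]
          rw [ih (pos + 1) (combo ++ [c]) r (by omega), hm']
      rw [aux, hm]
      simp [specP]

theorem foldl_addif (f : List Int → List Int) (P : List Int → Prop) [DecidablePred P] :
    ∀ (l : List (List Int)) (res : PySem.Set (List Int)),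
      l.foldl (fun r p => if P p then PySem.Set.add r (f p) else r) res
        = (l.filterMap (fun p => if P p then some (f p) else none)).foldl PySem.Set.add res := by
  intro l
  induction l with
  | nil => intro res; simp
  | cons a l ih =>
    intro res
    simp only [List.foldl_cons, List.filterMap_cons]
    by_cases h : P a
    · simp only [if_pos h, ih, List.foldl_cons]
    · simp only [if_neg h, ih]

theorem solution_alt_eq (user_id banned_id : List String) :
    solution_alt user_id banned_id
      = ((PySem.Set.ofList
          ((specP (fun j => (solCands user_id banned_id).getD j []) banned_id.length 0 []).filterMap
            (fun p => if (pySetTuple p).length = banned_id.length then some (pySetTuple p) else none))).length : Int) := by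
  show ((altRec banned_id.length (solCands user_id banned_id) 0 [] PySem.Set.empty).length : Int) = _
  rw [altRec_eq banned_id.length (solCands user_id banned_id) banned_id.length 0 [] PySem.Set.empty (by omega)]
  rw [foldl_addif pySetTuple (fun p => (pySetTuple p).length = banned_id.length)]
  rw [PySem.Set.ofList_eq_foldl]
  rfl

-- ---- A's dictionary ----

-- A's per-pair acceptance test (length equal and cnt-loop finds no mismatch), as a Bool
def predA (u b : String) : Bool :=
  decide (PySem.Str.len u = PySem.Str.len b) && decide (solCnt b.toList u.toList = 0)

theorem solCnt_zero_iff :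
    ∀ (bl ul : List Char), ul.length = bl.length →
      (solCnt bl ul = 0 ↔ (ul.zip bl).all (fun p => p.2 == '*' || p.2 == p.1) = true) := by
  intro bl
  induction bl with
  | nil => intro ul h; cases ul <;> simp [solCnt] at h ⊢
  | cons b bs ih =>
    intro ul h
    cases ul with
    | nil => simp at h
    | cons u us =>
      simp only [List.length_cons, Nat.add_right_cancel_iff] at h
      by_cases hb : b = '*'
      · subst hb; simp [solCnt, ih us h]
      · by_cases hu : b = u
        · subst hu
          simp [solCnt, hb, ih us h]
        · simp [solCnt, hb, hu]

theorem predA_eq_solMatch (u b : String) : predA u b = solMatch u b := by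
  unfold predA solMatch
  by_cases h : PySem.Str.len u = PySem.Str.len b
  · have hb : (PySem.Str.len u == PySem.Str.len b) = true := beq_iff_eq.mpr h
    have hlen : u.toList.length = b.toList.length := by
      simp only [PySem.Str.len] at h; exact_mod_cast h
    rw [hb, decide_eq_true h, Bool.true_and, Bool.true_and]
    by_cases hc : solCnt b.toList u.toList = 0
    · rw [decide_eq_true hc, (solCnt_zero_iff _ _ hlen).mp hc]
    · have hfalse : ((u.toList.zip b.toList).all fun p => p.2 == '*' || p.2 == p.1) = false :=
        eq_false_of_ne_true (fun ha => hc ((solCnt_zero_iff _ _ hlen).mpr ha))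
      rw [decide_eq_false hc, hfalse]
  · have hb : (PySem.Str.len u == PySem.Str.len b) = false := beq_eq_false_iff_ne.mpr h
    rw [hb, decide_eq_false h, Bool.false_and, Bool.false_and]

theorem dicInit (L : List String) :
    ∀ (d : PySem.Dict String (List Int)), (∀ b, d.getD b [] = []) →
      ∀ b, (L.foldl (fun d b => d.insert b ([] : List Int)) d).getD b [] = [] := by
  induction L with
  | nil => intro d h b; simpa using h b
  | cons b0 L ih =>
    intro d h b
    simp only [List.foldl_cons]
    refine ih _ (fun b' => ?_) b
    rw [PySem.Dict.getD_insert]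
    split
    · rfl
    · exact h b'

theorem dicInner (banned_id : List String) (i : Int) (u : String) :
    ∀ (d : PySem.Dict String (List Int)) (b : String),
      (banned_id.foldl
        (fun d b =>
          if PySem.Str.len u ≠ PySem.Str.len b then d
          else if solCnt b.toList u.toList = 0 then
            (if i ∈ d.getD b [] then d
             else d.modify b [] (fun l => l ++ [i]))
          else d)
        d).getD b []
      = if b ∈ banned_id ∧ predA u b = true ∧ i ∉ d.getD b [] then d.getD b [] ++ [i]
        else d.getD b [] := by
  induction banned_id with
  | nil => intro d b; simp
  | cons bb L ih =>
    intro d b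
    simp only [List.foldl_cons]
    rw [ih]
    by_cases h1 : PySem.Str.len u ≠ PySem.Str.len bb
    · rw [if_pos h1]
      by_cases hb : b = bb
      · subst hb
        have hp : predA u b = false := by
          unfold predA
          rw [decide_eq_false h1, Bool.false_and]
        simp [hp]
      · simp [List.mem_cons, hb]
    · rw [if_neg h1]
      by_cases h2 : solCnt bb.toList u.toList = 0
      · rw [if_pos h2]
        by_cases h3 : i ∈ d.getD bb []
        · rw [if_pos h3]
          by_cases hb : b = bb
          · subst hb; simp [h3]
          · simp [List.mem_cons, hb]
        · rw [if_neg h3]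
          have hmod : ∀ b', (d.modify bb [] (fun l => l ++ [i])).getD b' []
              = if b' = bb then d.getD bb [] ++ [i] else d.getD b' [] :=
            fun b' => PySem.Dict.getD_modify d bb b' [] (fun l => l ++ [i])
          by_cases hb : b = bb
          · subst hb
            have hp : predA u b = true := by
              unfold predA
              rw [decide_eq_true (not_not.mp h1), decide_eq_true h2]
              rfl
            simp [hmod, hp, h3]
          · simp [hmod, hb, List.mem_cons]
      · rw [if_neg h2]
        by_cases hb : b = bb
        · subst hb
          have hp : predA u b = false := by
            unfold predA
            rw [decide_eq_false h2, Bool.and_false]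
          simp [hp]
        · simp [List.mem_cons, hb]

theorem dicOuter (banned_id : List String) :
    ∀ (P : List (Int × String)) (d : PySem.Dict String (List Int)),
      (∀ b p, p ∈ P → p.1 ∉ d.getD b []) → (P.map Prod.fst).Nodup →
      ∀ b,
      ((P.foldl
        (fun d iu =>
          banned_id.foldl
            (fun d b =>
              if PySem.Str.len iu.2 ≠ PySem.Str.len b then d
              else if solCnt b.toList iu.2.toList = 0 then
                (if iu.1 ∈ d.getD b [] then d
                 else d.modify b [] (fun l => l ++ [iu.1]))
              else d)
            d)
        d).getD b [])
      = d.getD b []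
        ++ P.filterMap (fun iu => if b ∈ banned_id ∧ predA iu.2 b = true then some iu.1 else none) := by
  intro P
  induction P with
  | nil => intro d _ _ b; simp
  | cons iu P ih =>
    intro d hf hnd b
    obtain ⟨i, u⟩ := iu
    simp only [List.foldl_cons]
    have hstep : ∀ b', (banned_id.foldl
        (fun d b =>
          if PySem.Str.len u ≠ PySem.Str.len b then d
          else if solCnt b.toList u.toList = 0 then
            (if i ∈ d.getD b [] then d
             else d.modify b [] (fun l => l ++ [i]))
          else d) d).getD b' []
        = if b' ∈ banned_id ∧ predA u b' = true then d.getD b' [] ++ [i] else d.getD b' [] := by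
      intro b'
      rw [dicInner banned_id i u d b']
      have : i ∉ d.getD b' [] := hf b' (i, u) (List.mem_cons_self ..)
      simp [this]
    rw [ih _ ?hf ?hnd b]
    · rw [hstep b]
      simp only [List.filterMap_cons]
      by_cases hc : b ∈ banned_id ∧ predA u b = true
      · simp [hc, List.append_assoc]
      · simp [hc]
    case hf =>
      intro b' p hp
      rw [hstep b']
      have h1 : p.1 ∉ d.getD b' [] := hf b' p (List.mem_cons_of_mem _ hp)
      have h2 : p.1 ≠ i := by
        simp only [List.map_cons, List.nodup_cons] at hnd
        intro he
        exact hnd.1 (he ▸ List.mem_map_of_mem hp)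
      split
      · simp [h1, h2]
      · exact h1
    case hnd =>
      simp only [List.map_cons, List.nodup_cons] at hnd
      exact hnd.2

theorem enum_length {α : Type} : ∀ (xs : List α) (s : Int),
    (PySem.List.enumerate xs s).length = xs.length := by
  intro xs
  induction xs with
  | nil => intro s; simp [PySem.List.enumerate]
  | cons x t ih => intro s; simp [PySem.List.enumerate, ih]

theorem enum_fst_ge {α : Type} : ∀ (xs : List α) (s : Int) (p : Int × α),
    p ∈ PySem.List.enumerate xs s → s ≤ p.1 := by
  intro xs
  induction xs with
  | nil => intro s p hp; simp [PySem.List.enumerate] at hp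
  | cons x t ih =>
    intro s p hp
    simp only [PySem.List.enumerate, List.mem_cons] at hp
    rcases hp with h | h
    · subst h; simp
    · have := ih (s + 1) p h; omega

theorem enum_fst_nodup {α : Type} : ∀ (xs : List α) (s : Int),
    ((PySem.List.enumerate xs s).map Prod.fst).Nodup := by
  intro xs
  induction xs with
  | nil => intro s; simp [PySem.List.enumerate]
  | cons x t ih =>
    intro s
    simp only [PySem.List.enumerate, List.map_cons, List.nodup_cons]
    refine ⟨?_, ih (s + 1)⟩
    intro hmem
    obtain ⟨p, hp, he⟩ := List.mem_map.mp hmem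
    have := enum_fst_ge t (s + 1) p hp
    omega

-- the dictionary A builds, looked up at any key, is B's matching-index list for that mask
theorem solDic_getD (user_id banned_id : List String) (b : String) :
    (solDic user_id banned_id).getD b []
      = (PySem.List.enumerate user_id).filterMap
          (fun iu => if b ∈ banned_id ∧ predA iu.2 b = true then some iu.1 else none) := by
  unfold solDic
  rw [dicOuter banned_id (PySem.List.enumerate user_id) _ ?hf (enum_fst_nodup user_id 0) b]
  · rw [dicInit banned_id PySem.Dict.empty (fun b' => PySem.Dict.getD_empty b' []) b]
    simp
  case hf =>
    intro b' p _
    rw [dicInit banned_id PySem.Dict.empty (fun b'' => PySem.Dict.getD_empty b'' []) b']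
    simp

theorem solCandf_le (user_id banned_id : List String) (j : Nat) :
    (solCandf (solDic user_id banned_id) banned_id j).length ≤ user_id.length := by
  unfold solCandf
  rw [solDic_getD]
  calc (List.filterMap _ (PySem.List.enumerate user_id)).length
      ≤ (PySem.List.enumerate user_id).length := List.length_filterMap_le _ _
    _ = user_id.length := enum_length user_id 0

theorem solCandf_eq (user_id banned_id : List String) (j : Nat) (hj : j < banned_id.length) :
    solCandf (solDic user_id banned_id) banned_id j = (solCands user_id banned_id).getD j [] := by
  unfold solCandf
  rw [PySem.List.pyGet?_natCast banned_id j]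
  rw [List.getElem?_eq_getElem hj]
  simp only [Option.getD_some]
  rw [solDic_getD]
  unfold solCands
  rw [List.getD_eq_getElem?_getD, List.getElem?_map, List.getElem?_eq_getElem hj]
  simp only [Option.map_some, Option.getD_some]
  refine List.filterMap_congr (fun iu _ => ?_)
  have hmem : banned_id[j] ∈ banned_id := List.getElem_mem hj
  rw [predA_eq_solMatch]
  simp [hmem]

-- ---- A's stack loop ----

-- potential of a stack entry: an upper bound on the number of loop iterations its subtree costs
def stkW (n k : Nat) (stack : List (Int × Nat)) : Nat :=
  (stack.map (fun p => (n + 1) ^ (k - 1 - p.2))).sum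

theorem foldl_cons_filter {β : Type} (P : Int → Prop) [DecidablePred P] (g : Int → β) :
    ∀ (l : List Int) (rest : List β),
      l.foldl (fun st d => if P d then st else g d :: st) rest
        = ((l.filter (fun d => decide (¬ P d))).reverse.map g) ++ rest := by
  intro l
  induction l with
  | nil => intro rest; simp
  | cons a l ih =>
    intro rest
    simp only [List.foldl_cons]
    by_cases h : P a
    · rw [if_pos h, ih]
      simp [h]
    · rw [if_neg h, ih]
      simp [h, List.append_assoc]

theorem flatMap_filter_none {β : Type} (q : Int → Bool) (f : Int → List β) :
    ∀ l : List Int, (∀ d ∈ l, q d = false → f d = []) →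
      (l.filter q).flatMap f = l.flatMap f := by
  intro l
  induction l with
  | nil => intro _; simp
  | cons a l ih =>
    intro h
    rcases hq : q a with _ | _
    · simp [hq, ih (fun d hd => h d (List.mem_cons_of_mem _ hd)),
        h a (List.mem_cons_self ..) hq]
    · simp [hq, ih (fun d hd => h d (List.mem_cons_of_mem _ hd))]

theorem take_set_le (ans : List Int) (i j : Nat) (v : Int) (h : j ≤ i) :
    (ans.set i v).take j = ans.take j := by
  rw [List.take_set]
  exact List.set_eq_of_length_le (by simp [List.length_take]; omega)

theorem take_succ_set (ans : List Int) (i : Nat) (v : Int) (h : i < ans.length) :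
    (ans.set i v).take (i + 1) = ans.take i ++ [v] := by
  rw [List.set_eq_take_append_cons_drop, if_pos h]
  have hlen : (ans.take i).length = i := by simp [List.length_take]; omega
  rw [List.take_append, hlen, List.take_of_length_le (by omega)]
  simp

theorem set_last (ans : List Int) (k : Nat) (v : Int) (h : ans.length = k) (hk : 1 ≤ k) :
    ans.set (k - 1) v = ans.take (k - 1) ++ [v] := by
  rw [List.set_eq_take_append_cons_drop, if_pos (by omega)]
  rw [List.drop_eq_nil_of_le (by omega)]

theorem pairwise_of_total {α : Type} (R : α → α → Prop) (h : ∀ a b, R a b) :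
    ∀ l : List α, l.Pairwise R := by
  intro l
  induction l with
  | nil => exact List.Pairwise.nil
  | cons a l ih => exact List.Pairwise.cons (fun b _ => h a b) ih

-- A's stack loop, on a well-formed stack with enough fuel, appends the contribution of each
-- entry: the right-to-left enumeration of the valid completions of its prefix path
theorem solLoop_spec (k n : Nat) (dic : PySem.Dict String (List Int)) (banned_id : List String)
    (hn : ∀ j, (solCandf dic banned_id j).length ≤ n) :
    ∀ (fuel : Nat) (stack : List (Int × Nat)) (ans : List Int) (acc : List (List Int)),
      (∀ p ∈ stack, p.2 < k) →
      stack.Pairwise (fun a b => b.2 ≤ a.2) →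
      ans.length = k →
      stkW n k stack ≤ fuel →
      solLoop k dic banned_id fuel stack ans acc
        = acc ++ stack.flatMap (fun p =>
            if p.1 ∈ ans.take p.2 then []
            else specR (solCandf dic banned_id) (k - (p.2 + 1)) (p.2 + 1) (ans.take p.2 ++ [p.1])) := by
  intro fuel
  induction fuel with
  | zero =>
    intro stack ans acc h1 h2 h3 hf
    cases stack with
    | nil => simp [solLoop]
    | cons p rest =>
      exfalso
      have hp1 : 1 ≤ (n + 1) ^ (k - 1 - p.2) := Nat.one_le_pow _ _ (by omega)
      have : stkW n k (p :: rest) = (n + 1) ^ (k - 1 - p.2) + stkW n k rest := by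
        unfold stkW; simp
      omega
  | succ fuel ih =>
    intro stack ans acc h1 h2 h3 hf
    cases stack with
    | nil => simp [solLoop]
    | cons p rest =>
      obtain ⟨v, i⟩ := p
      have hik : i < k := h1 (v, i) (List.mem_cons_self ..)
      have hrest_le : ∀ q ∈ rest, q.2 ≤ i := (List.pairwise_cons.mp h2).1
      have hrest_pw : rest.Pairwise (fun a b => b.2 ≤ a.2) := (List.pairwise_cons.mp h2).2
      have hrest_lt : ∀ q ∈ rest, q.2 < k := fun q hq => h1 q (List.mem_cons_of_mem _ hq)
      have hpow1 : 1 ≤ (n + 1) ^ (k - 1 - i) := Nat.one_le_pow _ _ (by omega)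
      have hwcons : stkW n k ((v, i) :: rest) = (n + 1) ^ (k - 1 - i) + stkW n k rest := by
        unfold stkW; simp
      rw [solLoop]
      by_cases hv : v ∈ ans.take i
      · rw [if_pos hv]
        rw [ih rest ans acc hrest_lt hrest_pw h3 (by omega)]
        simp [hv]
      · rw [if_neg hv]
        have hlen' : (ans.set i v).length = k := by simp [h3]
        have htake : ∀ q : Int × Nat, q ∈ rest →
            ((ans.set i v).take q.2 = ans.take q.2) :=
          fun q hq => take_set_le ans i q.2 v (hrest_le q hq)
        by_cases hi : i = k - 1
        · rw [if_pos hi]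
          rw [ih rest (ans.set i v) (acc ++ [ans.set i v]) hrest_lt hrest_pw hlen' (by omega)]
          have hset : ans.set i v = ans.take i ++ [v] := by
            rw [hi] at *
            exact set_last ans k v h3 (by omega)
          have hflat : rest.flatMap (fun p =>
              if p.1 ∈ (ans.set i v).take p.2 then []
              else specR (solCandf dic banned_id) (k - (p.2 + 1)) (p.2 + 1)
                ((ans.set i v).take p.2 ++ [p.1]))
              = rest.flatMap (fun p =>
              if p.1 ∈ ans.take p.2 then []
              else specR (solCandf dic banned_id) (k - (p.2 + 1)) (p.2 + 1)
                (ans.take p.2 ++ [p.1])) :=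
            List.flatMap_congr (fun q hq => by rw [htake q hq])
          rw [hflat]
          have hrem : k - (i + 1) = 0 := by omega
          simp only [List.flatMap_cons, if_neg hv, hrem, specR, hset]
          simp [List.append_assoc]
        · rw [if_neg hi]
          have hik2 : i + 1 < k := by omega
          have hvmem : v ∈ ans.set i v := List.mem_set (by omega) v
          rw [foldl_cons_filter (fun d => d = v ∧ d ∈ ans.set i v) (fun d => (d, i + 1)) _ rest]
          set C := solCandf dic banned_id (i + 1) with hC
          set L0 := C.filter (fun d => decide (¬ (d = v ∧ d ∈ ans.set i v))) with hL0
          have hchlen : L0.length ≤ n := le_trans (List.length_filter_le _ _) (hn (i + 1))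
          have hch2 : ∀ q : Int × Nat, q ∈ L0.reverse.map (fun d => (d, i + 1)) → q.2 = i + 1 := by
            intro q hq
            obtain ⟨d, _, he⟩ := List.mem_map.mp hq
            rw [← he]
          -- fuel accounting
          have hpowsplit : (n + 1) ^ (k - 1 - i) = (n + 1) * (n + 1) ^ (k - 1 - (i + 1)) := by
            have : k - 1 - i = (k - 1 - (i + 1)) + 1 := by omega
            rw [this, pow_succ, Nat.mul_comm]
          have hwch : stkW n k (L0.reverse.map (fun d => (d, i + 1)) ++ rest)
              = L0.length * (n + 1) ^ (k - 1 - (i + 1)) + stkW n k rest := by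
            unfold stkW
            rw [List.map_append, List.sum_append, List.map_map]
            congr 1
            have hconst : ((fun p : Int × Nat => (n + 1) ^ (k - 1 - p.2)) ∘ fun d : Int => (d, i + 1))
                = fun _ : Int => (n + 1) ^ (k - 1 - (i + 1)) := rfl
            rw [hconst, List.map_const']
            simp [List.sum_replicate, smul_eq_mul]
          have hfuel' : stkW n k (L0.reverse.map (fun d => (d, i + 1)) ++ rest) ≤ fuel := by
            rw [hwch]
            have hX1 : 1 ≤ (n + 1) ^ (k - 1 - (i + 1)) := Nat.one_le_pow _ _ (by omega)
            have hmul : L0.length * (n + 1) ^ (k - 1 - (i + 1)) ≤ n * (n + 1) ^ (k - 1 - (i + 1)) :=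
              Nat.mul_le_mul_right _ hchlen
            have hsucc : (n + 1) * (n + 1) ^ (k - 1 - (i + 1))
                = n * (n + 1) ^ (k - 1 - (i + 1)) + (n + 1) ^ (k - 1 - (i + 1)) := by ring
            rw [hwcons, hpowsplit] at hf
            omega
          rw [ih (L0.reverse.map (fun d => (d, i + 1)) ++ rest) (ans.set i v) acc
            ?h1 ?h2 hlen' hfuel']
          case h1 =>
            intro q hq
            rcases List.mem_append.mp hq with hq | hq
            · rw [hch2 q hq]; omega
            · exact hrest_lt q hq
          case h2 =>
            rw [List.pairwise_append]
            refine ⟨?_, hrest_pw, ?_⟩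
            · exact List.pairwise_map.mpr (pairwise_of_total _ (fun a b => Nat.le_refl (i + 1)) _)
            · intro a ha b hb
              rw [hch2 a ha]
              have := hrest_le b hb
              omega
          congr 1
          rw [List.flatMap_append]
          have hflatrest : rest.flatMap (fun p =>
              if p.1 ∈ (ans.set i v).take p.2 then []
              else specR (solCandf dic banned_id) (k - (p.2 + 1)) (p.2 + 1)
                ((ans.set i v).take p.2 ++ [p.1]))
              = rest.flatMap (fun p =>
              if p.1 ∈ ans.take p.2 then []
              else specR (solCandf dic banned_id) (k - (p.2 + 1)) (p.2 + 1)
                (ans.take p.2 ++ [p.1])) :=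
            List.flatMap_congr (fun q hq => by rw [htake q hq])
          rw [hflatrest]
          simp only [List.flatMap_cons]
          congr 1
          rw [if_neg hv]
          rw [List.flatMap_map]
          have htk : (ans.set i v).take (i + 1) = ans.take i ++ [v] := take_succ_set ans i v (by omega)
          have hrem : k - (i + 1) = (k - (i + 2)) + 1 := by omega
          rw [hrem]
          simp only [specR, htk]
          rw [show L0.reverse = C.reverse.filter (fun d => decide (¬ (d = v ∧ d ∈ ans.set i v))) from
            (List.filter_reverse).symm]
          refine flatMap_filter_none _ _ _ (fun d _ hq => ?_)
          have hd : d = v ∧ d ∈ ans.set i v := by simpa using hq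
          rw [if_pos (by rw [hd.1]; exact List.mem_append_right _ (List.mem_singleton_self v))]

theorem foldl_cons_rev {β : Type} (g : Int → β) :
    ∀ (l : List Int) (rest : List β),
      l.foldl (fun st v => g v :: st) rest = (l.reverse.map g) ++ rest := by
  intro l
  induction l with
  | nil => intro rest; simp
  | cons a l ih => intro rest; simp [ih]

theorem stkW_map_const (n k j : Nat) (l : List Int) :
    stkW n k (l.map (fun d => (d, j))) = l.length * (n + 1) ^ (k - 1 - j) := by
  unfold stkW
  rw [List.map_map]
  have hconst : ((fun p : Int × Nat => (n + 1) ^ (k - 1 - p.2)) ∘ fun d : Int => (d, j))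
      = fun _ : Int => (n + 1) ^ (k - 1 - j) := rfl
  rw [hconst, List.map_const']
  simp [List.sum_replicate, smul_eq_mul]

theorem list_count_len (k : Nat) (S : List (List Int)) (h : ∀ l ∈ S, ¬ l.length < k) :
    S.foldl (fun acc l => if l.length < k then acc else acc + 1) (0 : Int) = (S.length : Int) := by
  rw [PySem.List.foldl_congr_mem S _ (fun acc _ => acc + 1) 0
    (fun acc x hx => by rw [if_neg (h x hx)])]
  rw [PySem.List.foldl_add S (fun _ => (1 : Int)) 0, PySem.List.sum_map_const_int]
  ring

-- ===== VERDICT (by name: the statement is the Claim_ definition above) =====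
theorem solution_spec : Claim_equal_solution := by
  unfold Claim_equal_solution
  intro user_id banned_id _ hpre
  unfold Spec_solution
  have hk1 : 0 < banned_id.length := List.length_pos_of_ne_nil hpre
  simp only [solution]
  set n := user_id.length with hn
  set k := banned_id.length with hkdef
  set dic := solDic user_id banned_id with hdic
  set candfA := solCandf dic banned_id with hcA
  set candfB := fun j => (solCands user_id banned_id).getD j [] with hcB
  rw [foldl_cons_rev (fun v => (v, (0 : Nat))) (candfA 0) [], List.append_nil]
  have hnle : ∀ j, (candfA j).length ≤ n := fun j => solCandf_le user_id banned_id j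
  have hstack_mem : ∀ p ∈ (candfA 0).reverse.map (fun v => (v, (0 : Nat))), p.2 < k := by
    intro p hp
    obtain ⟨d, _, he⟩ := List.mem_map.mp hp
    rw [← he]; exact hk1
  have hpw : ((candfA 0).reverse.map (fun v => (v, (0 : Nat)))).Pairwise (fun a b => b.2 ≤ a.2) :=
    List.pairwise_map.mpr (pairwise_of_total _ (fun a b => Nat.le_refl 0) _)
  have hfuel : stkW n k ((candfA 0).reverse.map (fun v => (v, (0 : Nat)))) ≤ (n + 1) ^ k := by
    rw [stkW_map_const]
    have h1 : (candfA 0).reverse.length ≤ n := by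
      rw [List.length_reverse]; exact hnle 0
    have h2 : (n + 1) ^ k = (n + 1) ^ (k - 1 - 0) * (n + 1) := by
      rw [Nat.sub_zero, ← pow_succ]
      congr 1
      omega
    have h3 : (candfA 0).reverse.length * (n + 1) ^ (k - 1 - 0) ≤ n * (n + 1) ^ (k - 1 - 0) :=
      Nat.mul_le_mul_right _ h1
    have h4 : 0 ≤ (n + 1) ^ (k - 1 - 0) := Nat.zero_le _
    have h5 : (n + 1) ^ (k - 1 - 0) * (n + 1) = n * (n + 1) ^ (k - 1 - 0) + (n + 1) ^ (k - 1 - 0) := by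
      ring
    omega
  rw [solLoop_spec k n dic banned_id hnle ((n + 1) ^ k)
    ((candfA 0).reverse.map (fun v => (v, (0 : Nat)))) (List.replicate k (-1)) []
    hstack_mem hpw (by simp) hfuel]
  simp only [List.nil_append]
  rw [List.flatMap_map]
  have hinner : ∀ v : Int,
      (if v ∈ (List.replicate k (-1 : Int)).take 0 then []
       else specR candfA (k - (0 + 1)) (0 + 1) ((List.replicate k (-1 : Int)).take 0 ++ [v]))
      = specR candfA (k - 1) 1 [v] := by
    intro v; simp
  rw [List.flatMap_congr (fun v _ => hinner v)]
  have hspec0 : (candfA 0).reverse.flatMap (fun v => specR candfA (k - 1) 1 [v])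
      = specR candfA k 0 [] := by
    obtain ⟨m, hm⟩ : ∃ m, k = m + 1 := ⟨k - 1, by omega⟩
    rw [hm]
    simp only [specR, Nat.add_sub_cancel]
    refine (List.flatMap_congr (fun c _ => ?_)).symm
    simp
  rw [hspec0]
  rw [specR_congr candfA candfB k 0 []
    (fun j _ hj => solCandf_eq user_id banned_id j (by omega))]
  -- members of the pruned enumeration are the nodup members of the product, of length k
  have hmemP : ∀ p, p ∈ specR candfB k 0 [] ↔ p ∈ specP candfB k 0 [] ∧ p.Nodup := by
    intro p
    rw [specR_mem, specL_mem_iff candfB k 0 [] List.nodup_nil]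
  have hlenP : ∀ p, p ∈ specP candfB k 0 [] → p.length = k := by
    intro p hp
    have := specP_length candfB k 0 [] p hp
    simpa using this
  have hlenTA : ∀ l ∈ PySem.Set.ofList ((specR candfB k 0 []).map pySetTuple), ¬ l.length < k := by
    intro l hl
    have hmem := (PySem.Set.mem_ofList _ l).1 hl
    obtain ⟨p, hp, he⟩ := List.mem_map.mp hmem
    obtain ⟨hpP, hpnd⟩ := (hmemP p).1 hp
    have : l.length = p.length := by rw [← he]; exact pySetTuple_length_of_nodup p hpnd
    have := hlenP p hpP
    omega
  rw [list_count_len k _ hlenTA]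
  rw [solution_alt_eq user_id banned_id]
  congr 1
  have hmemiff : ∀ x,
      x ∈ PySem.Set.ofList ((specR candfB k 0 []).map pySetTuple)
        ↔ x ∈ PySem.Set.ofList
            ((specP candfB k 0 []).filterMap
              (fun p => if (pySetTuple p).length = k then some (pySetTuple p) else none)) := by
    intro x
    rw [PySem.Set.mem_ofList, PySem.Set.mem_ofList]
    rw [List.mem_map, List.mem_filterMap]
    constructor
    · rintro ⟨p, hp, he⟩
      obtain ⟨hpP, hpnd⟩ := (hmemP p).1 hp
      refine ⟨p, hpP, ?_⟩
      rw [if_pos (by rw [pySetTuple_length_of_nodup p hpnd]; exact hlenP p hpP), he]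
    · rintro ⟨p, hp, he⟩
      by_cases hc : (pySetTuple p).length = k
      · rw [if_pos hc, Option.some_inj] at he
        have hpnd : p.Nodup := (pySetTuple_length_eq_iff p k (hlenP p hp)).mp hc
        exact ⟨p, (hmemP p).2 ⟨hp, hpnd⟩, he⟩
      · rw [if_neg hc] at he
        simp at he
  exact ((List.perm_ext_iff_of_nodup (PySem.Set.nodup_ofList _) (PySem.Set.nodup_ofList _)).mpr
    hmemiff).length_eq
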